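-- pv_equiv track=rewrite | github.com/sksmslhy/Java_Lexical_and_Syntax_Analyzer | main.py | isArithmetic
-- ===== SOURCE A (Python) =====
-- ARITHMETIC = ['+','-','*','/']
--
-- def isArithmetic(token):
--     state = ['T0', 'T1', 'T2', 'T3', 'T4']
--     locate = state[0]
--     for value in token:
--         if locate == state[0]:
--             if value in ARITHMETIC[0] :
--                 locate = state[1]
--             elif value in ARITHMETIC[1] :
--                 locate = state[2]
--             elif value in ARITHMETIC[2] :
--                 locate = state[3]
--             elif value in ARITHMETIC[3] :
--                 locate = state[4]
--             else : return False
--         else : return False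
--
--     if locate == state[1] or locate == state[2] or locate == state[3] or locate == state[4]:
--         return True
--     else:
--         return False
-- ===== SOURCE B (Python) =====
-- ARITHMETIC = ['+','-','*','/']
--
-- def isArithmetic(token):
--     return len(token) == 1 and token[0] in ARITHMETIC
-- ===== Notes on version B (the rewrite author's own statement) =====
-- stated objective: simpler
-- what changed: Replaces the T0-T4 per-character state machine with a closed-form check: length equals 1 and the single character is one of +,-,*,/.
import Mathlib
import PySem

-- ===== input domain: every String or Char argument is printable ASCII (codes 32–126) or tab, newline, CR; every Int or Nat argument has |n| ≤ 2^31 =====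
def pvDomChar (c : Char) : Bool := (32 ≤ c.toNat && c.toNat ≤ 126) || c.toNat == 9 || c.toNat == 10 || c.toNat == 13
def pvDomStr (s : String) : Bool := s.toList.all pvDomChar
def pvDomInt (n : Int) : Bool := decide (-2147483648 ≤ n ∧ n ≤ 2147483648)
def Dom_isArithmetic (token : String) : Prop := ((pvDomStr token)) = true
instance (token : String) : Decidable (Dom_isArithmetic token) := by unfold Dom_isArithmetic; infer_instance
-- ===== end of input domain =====

-- B replaces A's T0–T4 per-character state machine with a closed-form check:
-- length is 1 and the single character is one of '+','-','*','/' (simpler).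

-- ===== PORT A =====
-- the loop with early 'return False'; locate carries the state label string, as in A
def isArithmeticLoop : List Char → String → Bool
  | [], locate =>
      -- code after the loop
      if locate == "T1" || locate == "T2" || locate == "T3" || locate == "T4" then true
      else false
  | value :: rest, locate =>
      if locate == "T0" then
        if value == '+' then isArithmeticLoop rest "T1"
        else if value == '-' then isArithmeticLoop rest "T2"
        else if value == '*' then isArithmeticLoop rest "T3"
        else if value == '/' then isArithmeticLoop rest "T4"
        else false
      else false

def isArithmetic (token : String) : Bool :=
  isArithmeticLoop token.toList "T0"

-- ===== PORT B =====
def isArithmetic_alt (token : String) : Bool :=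
  token.toList.length == 1 &&
    (match PySem.List.pyGet? token.toList 0 with
     | some c => c ∈ ['+', '-', '*', '/']
     | none => false)

-- ===== PRECONDITION & SPEC =====
def Spec_isArithmetic (token : String) (out : Bool) : Prop := out = isArithmetic_alt token
instance (token : String) (out : Bool) : Decidable (Spec_isArithmetic token out) := by unfold Spec_isArithmetic; infer_instance

-- ===== CLAIM (what is proved, stated in full; the proofs are below) =====
def Claim_equal_isArithmetic : Prop := ∀ (token : String), Dom_isArithmetic token → Spec_isArithmetic token (isArithmetic token)

-- ===== LEMMAS AND PROOFS =====
theorem loop_eq (chars : List Char) :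
    isArithmeticLoop chars "T0" =
      (chars.length == 1 &&
        (match PySem.List.pyGet? chars 0 with
         | some c => c ∈ ['+', '-', '*', '/']
         | none => false)) := by
  match chars with
  | [] => decide
  | [c] =>
      by_cases h1 : c = '+' <;> by_cases h2 : c = '-' <;> by_cases h3 : c = '*' <;>
        by_cases h4 : c = '/' <;>
        simp_all [isArithmeticLoop, PySem.List.pyGet?, PySem.List.pyIdx?]
  | c :: d :: rest =>
      by_cases h1 : c = '+' <;> by_cases h2 : c = '-' <;> by_cases h3 : c = '*' <;>
        by_cases h4 : c = '/' <;>
        simp_all [isArithmeticLoop]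

-- ===== VERDICT (by name: the statement is the Claim_ definition above) =====
theorem isArithmetic_spec : Claim_equal_isArithmetic := by
  intro token _
  unfold Spec_isArithmetic isArithmetic isArithmetic_alt
  exact loop_eq token.toList
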